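-- pv_equiv track=rewrite | github.com/patronrpg/patronrpg.github.io | scripts/simple_character_generator.py | load_names
-- ===== SOURCE A (Python) =====
-- def load_names(data, subclasses_list):
--     subclasses_names = {}
--     current_subclass = None
--     for line in data.splitlines():
--         if line.strip():
--             if line.strip() in subclasses_list:
--                 current_subclass = line.strip()
--                 subclasses_names[current_subclass] = []
--                 continue
--             if current_subclass:
--                 subclasses_names[current_subclass].append(line.strip())
--     return subclasses_names
-- ===== SOURCE B (Python) =====
-- def _body_len(rest, headers):
--     """Index of the first header line in rest, or len(rest) if none."""
--     for i, line in enumerate(rest):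
--         if line in headers:
--             return i
--     return len(rest)
--
--
-- def _sections(lines, headers):
--     """Split a line list that starts with a header into (header, body) pairs."""
--     if not lines:
--         return []
--     head, rest = lines[0], lines[1:]
--     n = _body_len(rest, headers)
--     return [(head, rest[:n])] + _sections(rest[n:], headers)
--
--
-- def load_names(data, subclasses_list):
--     lines = [l.strip() for l in data.splitlines() if l.strip()]
--     while lines and lines[0] not in subclasses_list:
--         lines = lines[1:]
--     return dict(_sections(lines, subclasses_list))
-- ===== Notes on version B (the rewrite author's own statement) =====
-- stated objective: alternative
-- what changed: A's single stateful loop with a mutable current-header variable and in-place appends is replaced by a three-stage pipeline: normalize the non-empty stripped lines, split them into (header, body) sections by locating header boundaries, then build the dict from those pairs in one batch (dict() keeps A's duplicate-header overwrite semantics).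
import Mathlib
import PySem

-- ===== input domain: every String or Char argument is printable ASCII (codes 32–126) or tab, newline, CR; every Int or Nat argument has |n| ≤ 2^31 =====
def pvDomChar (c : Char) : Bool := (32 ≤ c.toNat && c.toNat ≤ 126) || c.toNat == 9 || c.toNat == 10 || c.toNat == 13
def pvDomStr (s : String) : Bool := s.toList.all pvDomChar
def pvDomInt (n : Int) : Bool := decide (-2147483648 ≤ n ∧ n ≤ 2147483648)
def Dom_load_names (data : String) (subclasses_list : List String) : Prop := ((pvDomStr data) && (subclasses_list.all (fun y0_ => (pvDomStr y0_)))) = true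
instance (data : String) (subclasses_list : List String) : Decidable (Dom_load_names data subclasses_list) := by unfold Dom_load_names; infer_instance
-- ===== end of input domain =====

-- B replaces A's single stateful loop (mutable current header + in-place appends) by a
-- three-stage decomposition: normalize lines, split them into (header, body) sections at
-- header boundaries, then build the dict in one batch; same cost, clearer structure.

-- ===== PORT A =====
-- A's loop body: state is (dict so far, current subclass or None)
def pvStepA (subclasses_list : List String)
    (st : PySem.Dict String (List String) × Option String) (line : String) :
    PySem.Dict String (List String) × Option String :=
  let s := PySem.Str.strip line
  if s ≠ "" then
    if s ∈ subclasses_list then (st.1.insert s [], some s)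
    else
      match st.2 with
      | some c => (st.1.modify c [] (· ++ [s]), st.2)   -- subclasses_names[current].append(s)
      | none => st
  else st

def load_names (data : String) (subclasses_list : List String) : List (String × List String) :=
  (((PySem.Str.splitlines data).foldl (pvStepA subclasses_list)
      (PySem.Dict.empty, none)).1).items

-- ===== PORT B =====
-- _body_len: index of the first header line, or len(rest) if none (a linear scan)
def pvBodyLen (headers : List String) (rest : List String) : Nat :=
  rest.findIdx (fun l => decide (l ∈ headers))

-- _sections: split a line list that starts with a header into (header, body) pairs
def pvSections (headers : List String) : List String → List (String × List String)
  | [] => []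
  | head :: rest =>
    let n := pvBodyLen headers rest
    (head, rest.take n) :: pvSections headers (rest.drop n)
  termination_by ls => ls.length
  decreasing_by simp

-- the 'while lines and lines[0] not in subclasses_list: lines = lines[1:]' loop
def pvSkip (headers : List String) : List String → List String
  | [] => []
  | l :: ls => if l ∈ headers then l :: ls else pvSkip headers ls

def load_names_alt (data : String) (subclasses_list : List String) : List (String × List String) :=
  let lines := ((PySem.Str.splitlines data).filter
      (fun l => !(PySem.Str.strip l == ""))).map PySem.Str.strip
  (PySem.Dict.ofList (pvSections subclasses_list (pvSkip subclasses_list lines))).items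

-- ===== PRECONDITION & SPEC =====
def Spec_load_names (data : String) (subclasses_list : List String) (out : List (String × List String)) : Prop := out = load_names_alt data subclasses_list
instance (data : String) (subclasses_list : List String) (out : List (String × List String)) : Decidable (Spec_load_names data subclasses_list out) := by unfold Spec_load_names; infer_instance

-- ===== CLAIM (what is proved, stated in full; the proofs are below) =====
def Claim_equal_load_names : Prop := ∀ (data : String) (subclasses_list : List String), Dom_load_names data subclasses_list → Spec_load_names data subclasses_list (load_names data subclasses_list)

-- ===== LEMMAS AND PROOFS =====

-- folding A's raw-line step equals folding the stripped step over the normalized lines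
def pvStep' (subclasses_list : List String)
    (st : PySem.Dict String (List String) × Option String) (s : String) :
    PySem.Dict String (List String) × Option String :=
  if s ∈ subclasses_list then (st.1.insert s [], some s)
  else
    match st.2 with
    | some c => (st.1.modify c [] (· ++ [s]), st.2)
    | none => st

lemma foldA_eq_fold' (sub : List String) :
    ∀ (raw : List String) (st : PySem.Dict String (List String) × Option String),
    raw.foldl (pvStepA sub) st
      = ((raw.filter (fun l => !(PySem.Str.strip l == ""))).map PySem.Str.strip).foldl
          (pvStep' sub) st := by
  intro raw
  induction raw with
  | nil => intro st; rfl
  | cons l raw ih =>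
    intro st
    by_cases h : PySem.Str.strip l = ""
    · simp [List.foldl, pvStepA, h, ih]
    · simp [List.foldl, pvStepA, pvStep', h, ih]

lemma fold'_skip (sub : List String) :
    ∀ (ls : List String) (d : PySem.Dict String (List String)),
    ls.foldl (pvStep' sub) (d, none)
      = (pvSkip sub ls).foldl (pvStep' sub) (d, none) := by
  intro ls
  induction ls with
  | nil => intro d; rfl
  | cons l ls ih =>
    intro d
    by_cases h : l ∈ sub
    · simp [pvSkip, h]
    · simp [pvSkip, h, List.foldl, pvStep', ih]

lemma skip_length_le (sub : List String) : ∀ ls : List String, (pvSkip sub ls).length ≤ ls.length := by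
  intro ls
  induction ls with
  | nil => simp [pvSkip]
  | cons l ls ih =>
    by_cases h : l ∈ sub
    · simp [pvSkip, h]
    · simp [pvSkip, h]; omega

lemma skip_idem (sub : List String) : ∀ ls : List String, pvSkip sub (pvSkip sub ls) = pvSkip sub ls := by
  intro ls
  induction ls with
  | nil => rfl
  | cons l ls ih =>
    by_cases h : l ∈ sub
    · simp [pvSkip, h]
    · simp [pvSkip, h, ih]

lemma modify_insert_append (d : PySem.Dict String (List String)) (c : String)
    (acc : List String) (s : String) :
    (d.insert c acc).modify c [] (· ++ [s]) = d.insert c (acc ++ [s]) := by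
  simp [PySem.Dict.modify, PySem.Dict.getD_insert_self, PySem.Dict.insert_insert_self]

lemma fold'_body (sub : List String) :
    ∀ (ls : List String) (acc : List String) (d : PySem.Dict String (List String)) (c : String),
    ls.foldl (pvStep' sub) (d.insert c acc, some c)
      = (ls.drop (pvBodyLen sub ls)).foldl (pvStep' sub)
          (d.insert c (acc ++ ls.take (pvBodyLen sub ls)), some c) := by
  intro ls
  induction ls with
  | nil => intro acc d c; simp [pvBodyLen]
  | cons l ls ih =>
    intro acc d c
    by_cases h : l ∈ sub
    · simp [pvBodyLen, List.findIdx_cons, h]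
    · have hstep : pvStep' sub (d.insert c acc, some c) l
          = (d.insert c (acc ++ [l]), some c) := by
        simp [pvStep', h, modify_insert_append]
      simp only [List.foldl_cons, hstep, pvBodyLen, List.findIdx_cons, h, decide_false,
        cond_false, List.take_succ_cons, List.drop_succ_cons]
      rw [ih (acc ++ [l]) d c]
      simp [pvBodyLen]

lemma skip_drop_bodyLen (sub : List String) (t : List String) :
    pvSkip sub (t.drop (pvBodyLen sub t)) = t.drop (pvBodyLen sub t) := by
  rcases h : t.drop (pvBodyLen sub t) with _ | ⟨x, xs⟩
  · rfl
  · have hlt : pvBodyLen sub t < t.length := by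
      by_contra hge
      have : t.drop (pvBodyLen sub t) = [] := List.drop_eq_nil_of_le (by omega)
      simp [this] at h
    have hx : x = t[pvBodyLen sub t] := by
      have h0 : (t.drop (pvBodyLen sub t)).head? = t[pvBodyLen sub t]? := List.head?_drop
      rw [h, List.getElem?_eq_getElem hlt] at h0
      simpa using h0
    have hmem : x ∈ sub := by
      have := List.findIdx_getElem (p := fun l => decide (l ∈ sub)) (w := hlt)
      rw [hx]
      simpa [pvBodyLen] using this
    simp [pvSkip, hmem]

lemma fold'_sections (sub : List String) :
    ∀ (n : Nat) (ls : List String), ls.length ≤ n → pvSkip sub ls = ls →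
    ∀ (d : PySem.Dict String (List String)) (cur : Option String),
    (ls.foldl (pvStep' sub) (d, cur)).1
      = (pvSections sub ls).foldl (fun acc p => acc.insert p.1 p.2) d := by
  intro n
  induction n with
  | zero =>
    intro ls hlen _ d cur
    have : ls = [] := List.eq_nil_of_length_eq_zero (by omega)
    subst this; simp [pvSections]
  | succ n ih =>
    intro ls hlen hskip d cur
    rcases ls with _ | ⟨h, t⟩
    · simp [pvSections]
    · have hmem : h ∈ sub := by
        by_contra hno
        have : pvSkip sub (h :: t) = pvSkip sub t := by simp [pvSkip, hno]
        rw [this] at hskip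
        have := skip_length_le sub t
        rw [hskip] at this
        simp at this
      have hstep : pvStep' sub (d, cur) h = (d.insert h [], some h) := by
        simp [pvStep', hmem]
      rw [List.foldl_cons, hstep, fold'_body sub t [] d h]
      have hrec := ih (t.drop (pvBodyLen sub t))
        (by simp at hlen ⊢; omega) (skip_drop_bodyLen sub t)
        (d.insert h ([] ++ t.take (pvBodyLen sub t))) (some h)
      rw [hrec]
      simp only [pvSections]
      simp

-- ===== VERDICT (by name: the statement is the Claim_ definition above) =====
theorem load_names_spec : Claim_equal_load_names := by
  intro data sub _
  unfold Spec_load_names load_names load_names_alt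
  rw [foldA_eq_fold' sub, fold'_skip sub,
    fold'_sections sub
      (pvSkip sub (((PySem.Str.splitlines data).filter
        (fun l => !(PySem.Str.strip l == ""))).map PySem.Str.strip)).length
      (pvSkip sub (((PySem.Str.splitlines data).filter
        (fun l => !(PySem.Str.strip l == ""))).map PySem.Str.strip))
      (le_refl _) (skip_idem sub _) PySem.Dict.empty none]
  rfl
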